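-- pv_equiv track=rewrite | github.com/justin4957/self-reflexive-orchestrator | src/analyzers/issue_analyzer.py | _consensus_actionability
-- ===== SOURCE A (Python) =====
-- from typing import Any, Dict, List, Optional
--
-- def _consensus_actionability(
--     votes: List[tuple[bool, str]]
-- ) -> tuple[bool, str]:
--     """Determine consensus on actionability."""
--     if not votes:
--         return False, "No actionability determination from providers"
--
--     # Majority vote
--     yes_votes = sum(1 for actionable, _ in votes if actionable)
--     no_votes = len(votes) - yes_votes
--
--     if yes_votes > no_votes:
--         # Use most detailed reason from yes votes
--         reasons = [reason for actionable, reason in votes if actionable and reason]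
--         return True, (
--             reasons[0] if reasons else "Majority of providers indicate actionable"
--         )
--     else:
--         reasons = [
--             reason for actionable, reason in votes if not actionable and reason
--         ]
--         return False, (
--             reasons[0]
--             if reasons
--             else "Majority of providers indicate not actionable"
--         )
-- ===== SOURCE B (Python) =====
-- from typing import List
--
-- def _consensus_actionability(
--     votes: List[tuple[bool, str]]
-- ) -> tuple[bool, str]:
--     """Sort-median variant: the majority flag is the median of the votes sorted
--     with actionable-first, so no counting is needed; the reason is the first
--     truthy one on the winning side."""
--     if not votes:
--         return False, "No actionability determination from providers"
--     ordered = sorted(votes, key=lambda v: 0 if v[0] else 1)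
--     winner = ordered[len(votes) // 2][0]
--     default = ("Majority of providers indicate actionable" if winner
--                else "Majority of providers indicate not actionable")
--     return winner, next((r for a, r in votes if a == winner and r), default)
-- ===== Notes on version B (the rewrite author's own statement) =====
-- stated objective: alternative
-- what changed: B decides the majority without counting: it sorts the votes actionable-first and reads the flag of the median element (index n//2), which is True exactly when yes-votes strictly outnumber no-votes; the reason is then the first truthy reason on the winner's side, found by one generator scan keyed by the winner, replacing A's count plus per-branch comprehension.
import Mathlib
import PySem

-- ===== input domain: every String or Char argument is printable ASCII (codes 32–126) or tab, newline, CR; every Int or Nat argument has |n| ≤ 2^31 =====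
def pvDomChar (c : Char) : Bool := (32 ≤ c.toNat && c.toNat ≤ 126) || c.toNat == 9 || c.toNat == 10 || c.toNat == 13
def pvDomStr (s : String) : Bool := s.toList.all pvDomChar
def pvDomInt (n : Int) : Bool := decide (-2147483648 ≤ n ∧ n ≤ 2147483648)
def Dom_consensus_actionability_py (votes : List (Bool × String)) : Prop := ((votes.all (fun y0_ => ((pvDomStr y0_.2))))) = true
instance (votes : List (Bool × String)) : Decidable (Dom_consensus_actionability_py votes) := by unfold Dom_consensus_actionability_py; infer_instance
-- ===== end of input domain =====

-- B replaces A's counting majority by a sort-median decision: with the votes sorted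
-- actionable-first, the median element's flag is the strict majority verdict; the reason
-- is the first truthy reason on the winning side (alternative decomposition, same results).

-- ===== PORT A =====
def consensus_actionability_py (votes : List (Bool × String)) : Bool × String :=
  if votes = [] then (false, "No actionability determination from providers")
  else
    -- yes_votes = sum(1 for actionable, _ in votes if actionable); no_votes = len - yes
    let yes_votes := ((votes.filter (fun v => v.1)).map (fun _ => 1)).sum
    let no_votes := votes.length - yes_votes
    if yes_votes > no_votes then
      let reasons := (votes.filter (fun v => v.1 && v.2 != "")).map (fun v => v.2)
      (true, match reasons with
             | r :: _ => r
             | [] => "Majority of providers indicate actionable")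
    else
      let reasons := (votes.filter (fun v => !v.1 && v.2 != "")).map (fun v => v.2)
      (false, match reasons with
              | r :: _ => r
              | [] => "Majority of providers indicate not actionable")

-- ===== PORT B =====
def consensus_actionability_py_alt (votes : List (Bool × String)) : Bool × String :=
  if votes = [] then (false, "No actionability determination from providers")
  else
    -- ordered = sorted(votes, key=lambda v: 0 if v[0] else 1); winner = ordered[len(votes)//2][0]
    let ordered := PySem.List.sorted votes (fun v => if v.1 then (0 : Int) else 1)
    -- index len(votes)//2 is always in range for nonempty votes, so the getD default is unreachable
    let winner := ((PySem.List.pyGet? ordered (PySem.Int.floordiv votes.length 2)).getD (false, "")).1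
    let dflt := if winner then "Majority of providers indicate actionable"
                else "Majority of providers indicate not actionable"
    -- next((r for a, r in votes if a == winner and r), default)
    (winner, (((votes.filter (fun v => v.1 == winner && v.2 != "")).map (fun v => v.2)).head?).getD dflt)

-- ===== PRECONDITION & SPEC =====
def Spec_consensus_actionability_py (votes : List (Bool × String)) (out : Bool × String) : Prop := out = consensus_actionability_py_alt votes
instance (votes : List (Bool × String)) (out : Bool × String) : Decidable (Spec_consensus_actionability_py votes out) := by unfold Spec_consensus_actionability_py; infer_instance

-- ===== CLAIM (what is proved, stated in full; the proofs are below) =====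
def Claim_equal_consensus_actionability_py : Prop := ∀ (votes : List (Bool × String)), Dom_consensus_actionability_py votes → Spec_consensus_actionability_py votes (consensus_actionability_py votes)

-- ===== LEMMAS AND PROOFS =====

-- In any list pairwise-ordered by the yes-first 0/1 key, the element at index i is a yes
-- vote exactly when i is below the number of yes votes in the list.
theorem pv_get_of_pairwise (l : List (Bool × String))
    (hp : l.Pairwise (fun a b => (if a.1 then (0 : Int) else 1) ≤ (if b.1 then (0 : Int) else 1)))
    (i : Nat) (hi : i < l.length) :
    l[i].1 = decide (i < (l.filter (fun v => v.1)).length) := by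
  induction l generalizing i with
  | nil => simp at hi
  | cons v t ih =>
    rcases List.pairwise_cons.mp hp with ⟨hv, ht⟩
    by_cases h1 : v.1
    · cases i with
      | zero => simp [h1]
      | succ j =>
        have hj : j < t.length := by simpa using hi
        simp only [List.getElem_cons_succ, List.filter_cons, h1]
        rw [ih ht j hj]
        simp
    · -- head is a no vote; every later vote is a no vote too
      have hall : ∀ y ∈ t, y.1 = false := by
        intro y hy
        have h2 := hv y hy
        cases hy1 : y.1
        · rfl
        · simp [h1, hy1] at h2
      have hfil : ((v :: t).filter (fun v => v.1)).length = 0 := by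
        simp only [List.length_eq_zero_iff, List.filter_eq_nil_iff]
        intro y hy
        rcases List.mem_cons.mp hy with h | h
        · subst h; simpa using h1
        · simp [hall y h]
      rw [hfil]
      cases i with
      | zero => simpa using h1
      | succ j =>
        have hj : j < t.length := by simpa using hi
        simp only [List.getElem_cons_succ]
        simp [hall _ (List.getElem_mem hj)]

theorem pv_sum_ones (l : List (Bool × String)) :
    ((l.map (fun _ => 1)).sum : Nat) = l.length := by
  induction l with
  | nil => rfl
  | cons _ _ ih => simp [Nat.add_comm]

-- `reasons[0] if reasons else default` equals `head?.getD default`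
theorem pv_headD (l : List String) (d : String) :
    (match l with | r :: _ => r | [] => d) = l.head?.getD d := by
  cases l <;> rfl

-- ===== VERDICT (by name: the statement is the Claim_ definition above) =====
theorem consensus_actionability_py_spec : Claim_equal_consensus_actionability_py := by
  intro votes _
  unfold Spec_consensus_actionability_py consensus_actionability_py consensus_actionability_py_alt
  by_cases h : votes = []
  · simp [h]
  · simp only [h, ite_false]
    rw [pv_sum_ones]
    set key : Bool × String → Int := fun v => if v.1 then (0 : Int) else 1 with hkey
    set ordered := PySem.List.sorted votes key with hord
    have hperm : ordered.Perm votes := PySem.List.sorted_perm ..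
    have hlen : ordered.length = votes.length := hperm.length_eq
    have hpos : 0 < votes.length := List.length_pos_iff.mpr h
    have hidx : votes.length / 2 < ordered.length := by
      rw [hlen]; omega
    have hfd : PySem.Int.floordiv votes.length 2 = ((votes.length / 2 : Nat) : Int) := by
      simp only [PySem.Int.floordiv]
      rw [Int.fdiv_eq_ediv]
      omega
    have hget : PySem.List.pyGet? ordered (PySem.Int.floordiv votes.length 2)
        = some (ordered[votes.length / 2]) := by
      rw [hfd, PySem.List.pyGet?_natCast]
      simp [hidx]
    have hfilperm : (ordered.filter (fun v => v.1)).Perm (votes.filter (fun v => v.1)) :=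
      hperm.filter _
    have hwinner : (ordered[votes.length / 2]).1
        = decide (votes.length / 2 < (votes.filter (fun v => v.1)).length) := by
      rw [pv_get_of_pairwise ordered (PySem.List.sorted_pairwise ..) _ hidx,
          hfilperm.length_eq]
    have hyle : (votes.filter (fun v => v.1)).length ≤ votes.length :=
      List.length_filter_le _ _
    set y := (votes.filter (fun v => v.1)).length with hy
    simp only [hget, Option.getD_some, hwinner]
    by_cases hmaj : y > votes.length - y
    · have : votes.length / 2 < y := by omega
      simp only [hmaj, ite_true, this, decide_true, pv_headD]
      simp
    · have : ¬ (votes.length / 2 < y) := by omega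
      simp only [hmaj, ite_false, this, decide_false, pv_headD]
      simp
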